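-- pv_equiv track=rewrite | github.com/ashishk1331/advent-of-code-2023 | Day 2/cube_conundrum.py | part_two
-- ===== SOURCE A (Python) =====
-- def part_two(data):
--     mus = 0
--     for key, value in data.items():
--         minimum = {
--             'red': 0,
--             'green': 0,
--             'blue': 0
--         }
--         for subset in value:
--             for color in subset:
--                 minimum[color[1]] = max(minimum[color[1]], color[0])
--         mus += minimum['red']*minimum['green']*minimum['blue']
--     return mus
-- ===== SOURCE B (Python) =====
-- def part_two(data):
--     # Translate colors to positions once, then three filtered max-scans per game over the flat list.
--     COLORS = ['red', 'green', 'blue']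
--     total = 0
--     for value in data.values():
--         flat = [(COLORS.index(nm), cnt) for subset in value for cnt, nm in subset]
--         game = 1
--         for i in range(3):
--             game *= max([0] + [cnt for j, cnt in flat if j == i])
--         total += game
--     return total
-- ===== Notes on version B (the rewrite author's own statement) =====
-- stated objective: alternative
-- what changed: Drops A's shared per-color 'minimum' dict updated in lockstep: B first translates each game's draws to (position, count) pairs via a COLORS.index lookup table (flattening the game in one comprehension), then multiplies three independent filtered max-scans (each seeded with 0) over that flat list; Pre_ excludes exactly the inputs where A raises KeyError (a color name outside red/green/blue), on which B raises ValueError.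
import Mathlib
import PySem

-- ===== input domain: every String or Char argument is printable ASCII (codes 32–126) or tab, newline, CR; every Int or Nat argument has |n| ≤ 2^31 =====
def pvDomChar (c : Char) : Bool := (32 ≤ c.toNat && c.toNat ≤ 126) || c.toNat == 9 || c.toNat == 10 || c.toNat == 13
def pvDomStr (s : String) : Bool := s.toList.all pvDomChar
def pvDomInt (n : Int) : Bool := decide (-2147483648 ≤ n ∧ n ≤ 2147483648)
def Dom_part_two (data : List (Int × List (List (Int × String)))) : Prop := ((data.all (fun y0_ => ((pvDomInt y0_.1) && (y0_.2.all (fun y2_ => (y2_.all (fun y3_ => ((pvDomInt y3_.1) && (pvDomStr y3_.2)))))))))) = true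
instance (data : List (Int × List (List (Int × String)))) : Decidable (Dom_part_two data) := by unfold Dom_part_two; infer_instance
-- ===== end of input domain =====

-- B drops A's shared running-maxima dict entirely: three independent filtered max-scans per game (0-seeded), summed; same cost, idiomatic decomposition. Pre_ excludes the color names on which A raises KeyError.


-- ===== PORT A =====
-- minimum[color[1]] = max(minimum[color[1]], color[0]): 'none' models the KeyError on an unknown color name
def pvStepA (d : Option (PySem.Dict String Int)) (c : Int × String) : Option (PySem.Dict String Int) :=
  d.bind (fun m => (m.get? c.2).map (fun v => m.insert c.2 (max v c.1)))

def pvGameA (value : List (List (Int × String))) : Option (PySem.Dict String Int) :=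
  value.foldl (fun d subset => subset.foldl pvStepA d)
    (some (PySem.Dict.ofList [("red", 0), ("green", 0), ("blue", 0)]))

def part_two (data : List (Int × List (List (Int × String)))) : Int :=
  data.foldl (fun mus kv =>
    match pvGameA kv.2 with
    | some m => mus + m.getD "red" 0 * m.getD "green" 0 * m.getD "blue" 0
    | none => mus)   -- KeyError: unreachable under Pre_part_two
    0

-- ===== PORT B =====
-- COLORS.index(nm): 'none' models the ValueError on an unknown color name
def pvColors : List String := ["red", "green", "blue"]

-- flat = [(COLORS.index(nm), cnt) for subset in value for cnt, nm in subset]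
def pvFlat (value : List (List (Int × String))) : Option (List (Int × Int)) :=
  (value.flatMap id).mapM (fun c => (PySem.List.index? pvColors c.2).map (fun i => ((i : Int), c.1)))

-- game = 1; for i in range(3): game *= max([0] + [cnt for j, cnt in flat if j == i])
def pvGamePow (flat : List (Int × Int)) : Int :=
  (PySem.List.pyRange 0 3 1).foldl (fun game i =>
    game * (PySem.List.max? ((0 : Int) :: (flat.filter (fun jc => jc.1 == i)).map Prod.snd)
        (fun y => y)).getD 0) 1

def part_two_alt (data : List (Int × List (List (Int × String)))) : Int :=
  data.foldl (fun total kv =>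
    match pvFlat kv.2 with
    | some flat => total + pvGamePow flat
    | none => total)   -- ValueError: unreachable under Pre_part_two
    0

-- ===== PRECONDITION & SPEC =====
-- Pre_ excludes exactly the inputs on which A raises KeyError: a color name outside red/green/blue.
def Pre_part_two (data : List (Int × List (List (Int × String)))) : Prop :=
  ∀ kv ∈ data, ∀ sub ∈ kv.2, ∀ c ∈ sub, c.2 = "red" ∨ c.2 = "green" ∨ c.2 = "blue"
instance (data : List (Int × List (List (Int × String)))) : Decidable (Pre_part_two data) := by unfold Pre_part_two; infer_instance

def pvWitness_part_two : (List (Int × List (List (Int × String)))) :=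
  [(1, [[(3, "red"), (2, "green")], [(1, "blue")]]), (2, [[(5, "blue")]])]

def Spec_part_two (data : List (Int × List (List (Int × String)))) (out : Int) : Prop := out = part_two_alt data
instance (data : List (Int × List (List (Int × String)))) (out : Int) : Decidable (Spec_part_two data out) := by unfold Spec_part_two; infer_instance

-- ===== CLAIM (what is proved, stated in full; the proofs are below) =====
def Claim_equal_part_two : Prop := ∀ (data : List (Int × List (List (Int × String)))), Dom_part_two data → Pre_part_two data → Spec_part_two data (part_two data)

-- ===== LEMMAS AND PROOFS =====

-- per-game list of counts of color n, in draw order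
def pvCnt (value : List (List (Int × String))) (n : String) : List Int :=
  (value.flatten.filter (fun c => c.2 == n)).map Prod.fst

-- the pure per-color update A performs once the key is known to be present
def pvStepP (m : PySem.Dict String Int) (c : Int × String) : PySem.Dict String Int :=
  m.insert c.2 (max (m.getD c.2 0) c.1)

lemma pvContains_threeA (m : PySem.Dict String Int)
    (h : m.contains "red" = true ∧ m.contains "green" = true ∧ m.contains "blue" = true)
    (c : Int × String) :
    (pvStepP m c).contains "red" = true ∧ (pvStepP m c).contains "green" = true ∧
      (pvStepP m c).contains "blue" = true := by
  simp [pvStepP, PySem.Dict.contains_insert, h.1, h.2.1, h.2.2]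

lemma pvFoldA_eq_foldP (cs : List (Int × String)) :
    ∀ (m : PySem.Dict String Int),
      (∀ c ∈ cs, c.2 = "red" ∨ c.2 = "green" ∨ c.2 = "blue") →
      m.contains "red" = true ∧ m.contains "green" = true ∧ m.contains "blue" = true →
      cs.foldl pvStepA (some m) = some (cs.foldl pvStepP m) := by
  induction cs with
  | nil => intro m _ _; rfl
  | cons c t ih =>
    intro m hgood hc
    have hcon : m.contains c.2 = true := by
      rcases hgood c (by simp) with h | h | h <;> rw [h]
      · exact hc.1
      · exact hc.2.1
      · exact hc.2.2
    have hsome : m.get? c.2 = some (m.getD c.2 0) := by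
      rw [PySem.Dict.contains_eq_isSome_get?] at hcon
      rcases hv : m.get? c.2 with _ | v
      · rw [hv] at hcon; simp at hcon
      · have hd : m.getD c.2 0 = v := by rw [PySem.Dict.getD_eq_get?_getD, hv]; rfl
        rw [hd]
    have hstep : pvStepA (some m) c = some (pvStepP m c) := by
      simp [pvStepA, hsome, pvStepP]
    simp only [List.foldl_cons, hstep]
    exact ih (pvStepP m c) (fun x hx => hgood x (by simp [hx])) (pvContains_threeA m hc c)

lemma pvFoldP_getD (cs : List (Int × String)) :
    ∀ (m : PySem.Dict String Int) (n : String),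
      (cs.foldl pvStepP m).getD n 0
        = ((cs.filter (fun c => c.2 == n)).map Prod.fst).foldl max (m.getD n 0) := by
  induction cs with
  | nil => intro m n; rfl
  | cons c t ih =>
    intro m n
    by_cases h : c.2 = n
    · simp only [List.foldl_cons, ih, List.filter_cons, h, BEq.rfl, if_true, List.map_cons,
        List.foldl_cons]
      have : (pvStepP m c).getD n 0 = max (m.getD n 0) c.1 := by
        simp [pvStepP, h]
      rw [this]
    · have hne : (c.2 == n) = false := by simp [h]
      simp only [List.foldl_cons, ih, List.filter_cons, hne, Bool.false_eq_true, if_false]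
      have hkeep : (pvStepP m c).getD n 0 = m.getD n 0 := by
        simp [pvStepP, PySem.Dict.getD_insert, Ne.symm h]
      rw [hkeep]

lemma pvGameA_val (value : List (List (Int × String)))
    (hgood : ∀ sub ∈ value, ∀ c ∈ sub, c.2 = "red" ∨ c.2 = "green" ∨ c.2 = "blue") :
    (match pvGameA value with
      | some m => m.getD "red" 0 * m.getD "green" 0 * m.getD "blue" 0
      | none => (0 : Int))
      = (pvCnt value "red").foldl max 0 * (pvCnt value "green").foldl max 0
          * (pvCnt value "blue").foldl max 0 := by
  have hflat : ∀ c ∈ value.flatten, c.2 = "red" ∨ c.2 = "green" ∨ c.2 = "blue" := by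
    intro c hc
    rcases List.mem_flatten.mp hc with ⟨sub, hs, hcs⟩
    exact hgood sub hs c hcs
  have hA : pvGameA value
      = some (value.flatten.foldl pvStepP (PySem.Dict.ofList [("red", 0), ("green", 0), ("blue", 0)])) := by
    unfold pvGameA
    rw [← List.foldl_flatten]
    exact pvFoldA_eq_foldP value.flatten _ hflat (by decide)
  rw [hA]
  have hval : ∀ n : String,
      (value.flatten.foldl pvStepP (PySem.Dict.ofList [("red", 0), ("green", 0), ("blue", 0)])).getD n 0
        = ((value.flatten.filter (fun c => c.2 == n)).map Prod.fst).foldl max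
            ((PySem.Dict.ofList ([("red", 0), ("green", 0), ("blue", 0)] : List (String × Int))).getD n 0) :=
    fun n => pvFoldP_getD value.flatten _ n
  have e1 : (PySem.Dict.ofList ([("red", 0), ("green", 0), ("blue", 0)] : List (String × Int))).getD "red" 0 = (0 : Int) := by decide
  have e2 : (PySem.Dict.ofList ([("red", 0), ("green", 0), ("blue", 0)] : List (String × Int))).getD "green" 0 = (0 : Int) := by decide
  have e3 : (PySem.Dict.ofList ([("red", 0), ("green", 0), ("blue", 0)] : List (String × Int))).getD "blue" 0 = (0 : Int) := by decide
  simp only [hval, e1, e2, e3, pvCnt]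

-- the position pvColors.index assigns to each of the three color names
def pvIdxOf (n : String) : Int := if n = "red" then 0 else if n = "green" then 1 else 2

lemma pvIdx_red : PySem.List.index? pvColors "red" = some 0 := by decide
lemma pvIdx_green : PySem.List.index? pvColors "green" = some 1 := by decide
lemma pvIdx_blue : PySem.List.index? pvColors "blue" = some 2 := by decide

lemma pvMapM_some (l : List (Int × String))
    (h : ∀ c ∈ l, c.2 = "red" ∨ c.2 = "green" ∨ c.2 = "blue") :
    l.mapM (fun c => (PySem.List.index? pvColors c.2).map (fun i => ((i : Int), c.1)))
      = some (l.map (fun c => (pvIdxOf c.2, c.1))) := by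
  induction l with
  | nil => rfl
  | cons c t ih =>
    have hstep : (PySem.List.index? pvColors c.2).map (fun i => ((i : Int), c.1))
        = some (pvIdxOf c.2, c.1) := by
      rcases h c (by simp) with hc | hc | hc <;> rw [hc]
      · rw [pvIdx_red]; rfl
      · rw [pvIdx_green]; rfl
      · rw [pvIdx_blue]; rfl
    rw [List.mapM_cons, hstep, ih (fun x hx => h x (by simp [hx]))]
    rfl

lemma pvFlat_some (value : List (List (Int × String)))
    (hgood : ∀ sub ∈ value, ∀ c ∈ sub, c.2 = "red" ∨ c.2 = "green" ∨ c.2 = "blue") :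
    pvFlat value = some (value.flatten.map (fun c => (pvIdxOf c.2, c.1))) := by
  have hflat : ∀ c ∈ value.flatten, c.2 = "red" ∨ c.2 = "green" ∨ c.2 = "blue" := by
    intro c hc
    rcases List.mem_flatten.mp hc with ⟨sub, hs, hcs⟩
    exact hgood sub hs c hcs
  unfold pvFlat
  rw [List.flatMap_id]
  exact pvMapM_some value.flatten hflat

lemma pvFilterMap (l : List (Int × String))
    (h : ∀ c ∈ l, c.2 = "red" ∨ c.2 = "green" ∨ c.2 = "blue")
    (i : Int) (n : String)
    (hi : (i = 0 ∧ n = "red") ∨ (i = 1 ∧ n = "green") ∨ (i = 2 ∧ n = "blue")) :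
    ((l.map (fun c => (pvIdxOf c.2, c.1))).filter (fun jc => jc.1 == i)).map Prod.snd
      = (l.filter (fun c => c.2 == n)).map Prod.fst := by
  rw [List.filter_map]
  have hpred : ∀ c ∈ l,
      ((fun jc => jc.1 == i) ∘ (fun c : Int × String => (pvIdxOf c.2, c.1))) c
        = (fun c : Int × String => c.2 == n) c := by
    intro c hcl
    rcases h c hcl with hc | hc | hc <;>
      rcases hi with ⟨hi1, hi2⟩ | ⟨hi1, hi2⟩ | ⟨hi1, hi2⟩ <;>
      subst hi1 <;> subst hi2 <;> simp only [Function.comp, hc] <;> decide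
  rw [List.filter_congr hpred, List.map_map]
  rfl

lemma pvGame_eq (value : List (List (Int × String)))
    (hgood : ∀ sub ∈ value, ∀ c ∈ sub, c.2 = "red" ∨ c.2 = "green" ∨ c.2 = "blue") :
    (match pvFlat value with
      | some flat => pvGamePow flat
      | none => (0 : Int))
      = (pvCnt value "red").foldl max 0 * (pvCnt value "green").foldl max 0
          * (pvCnt value "blue").foldl max 0 := by
  have hflat : ∀ c ∈ value.flatten, c.2 = "red" ∨ c.2 = "green" ∨ c.2 = "blue" := by
    intro c hc
    rcases List.mem_flatten.mp hc with ⟨sub, hs, hcs⟩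
    exact hgood sub hs c hcs
  rw [pvFlat_some value hgood]
  have hrange : PySem.List.pyRange 0 3 1 = [0, 1, 2] := by decide
  have hfil : ∀ (i : Int) (n : String),
      (i = 0 ∧ n = "red") ∨ (i = 1 ∧ n = "green") ∨ (i = 2 ∧ n = "blue") →
      ((value.flatten.map (fun c => (pvIdxOf c.2, c.1))).filter (fun jc => jc.1 == i)).map Prod.snd
        = pvCnt value n := by
    intro i n hi
    rw [pvFilterMap value.flatten hflat i n hi]
    rfl
  simp only [pvGamePow, hrange, List.foldl_cons, List.foldl_nil,
    hfil 0 "red" (by simp), hfil 1 "green" (by simp), hfil 2 "blue" (by simp),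
    PySem.List.max?_id_cons, Option.getD_some]
  ring

lemma pvTotal (data : List (Int × List (List (Int × String)))) :
    ∀ acc : Int, Pre_part_two data →
      data.foldl (fun mus kv =>
        match pvGameA kv.2 with
        | some m => mus + m.getD "red" 0 * m.getD "green" 0 * m.getD "blue" 0
        | none => mus) acc
      = data.foldl (fun total kv =>
          match pvFlat kv.2 with
          | some flat => total + pvGamePow flat
          | none => total) acc := by
  induction data with
  | nil => intro acc _; rfl
  | cons kv t ih =>
    intro acc hpre
    have hga := pvGameA_val kv.2 (hpre kv (by simp))
    have hgb := pvGame_eq kv.2 (hpre kv (by simp))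
    have ht : Pre_part_two t := fun x hx => hpre x (by simp [hx])
    have hinit : (match pvGameA kv.2 with
        | some m => acc + m.getD "red" 0 * m.getD "green" 0 * m.getD "blue" 0
        | none => acc)
      = (match pvFlat kv.2 with
        | some flat => acc + pvGamePow flat
        | none => acc) := by
      rcases hA : pvGameA kv.2 with _ | m <;> rcases hB : pvFlat kv.2 with _ | flat <;>
        rw [hA] at hga <;> rw [hB] at hgb <;> dsimp only at hga hgb ⊢
      all_goals linarith
    simp only [List.foldl_cons]
    rw [ih _ ht, hinit]

-- ===== VERDICT (by name: the statement is the Claim_ definition above) =====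
theorem part_two_spec : Claim_equal_part_two := by
  intro data _ hpre
  unfold Spec_part_two part_two part_two_alt
  exact pvTotal data 0 hpre
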